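-- pv_equiv track=rewrite | github.com/lebohangngcombolo-sys/Recruitment | server/app/services/cv_pattern_matcher.py | _strip_attachment_blocks
-- ===== SOURCE A (Python) =====
-- def _strip_attachment_blocks(t: str) -> str:
--     keywords = [
--         "republic of south africa",
--         "department:",
--         "department of higher education",
--         "certificate of achievement",
--         "statement of results",
--         "identity number",
--         "serial number",
--         "issued by authority",
--         "umalusi",
--         "this certificate is printed",
--         "please hold up to the light",
--     ]
--
--     lower = t.lower()
--     indices = []
--     for kw in keywords:
--         idx = lower.find(kw)
--         if idx != -1:
--             indices.append(idx)
--
--     if not indices: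
--         return t
--
--     cut = min(indices)
--     if cut > 600:
--         return t[:cut].strip()
--     return t
-- ===== SOURCE B (Python) =====
-- def _strip_attachment_blocks(t: str) -> str:
--     keywords = [
--         "republic of south africa",
--         "department:",
--         "department of higher education",
--         "certificate of achievement",
--         "statement of results",
--         "identity number",
--         "serial number",
--         "issued by authority",
--         "umalusi",
--         "this certificate is printed",
--         "please hold up to the light",
--     ]
--
--     lower = t.lower()
--     # single left-to-right scan: stop at the first position where any keyword starts
--     for i in range(len(lower)):
--         if any(lower.startswith(kw, i) for kw in keywords):
--             if i > 600:
--                 return t[:i].strip()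
--             return t
--     return t
-- ===== Notes on version B (the rewrite author's own statement) =====
-- stated objective: alternative
-- what changed: Replaces the per-keyword find() passes plus a min() over the collected indices by a single left-to-right scan that stops at the first position where any keyword starts (the leftmost-match position equals the minimum of the per-keyword find indices).
import Mathlib
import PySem

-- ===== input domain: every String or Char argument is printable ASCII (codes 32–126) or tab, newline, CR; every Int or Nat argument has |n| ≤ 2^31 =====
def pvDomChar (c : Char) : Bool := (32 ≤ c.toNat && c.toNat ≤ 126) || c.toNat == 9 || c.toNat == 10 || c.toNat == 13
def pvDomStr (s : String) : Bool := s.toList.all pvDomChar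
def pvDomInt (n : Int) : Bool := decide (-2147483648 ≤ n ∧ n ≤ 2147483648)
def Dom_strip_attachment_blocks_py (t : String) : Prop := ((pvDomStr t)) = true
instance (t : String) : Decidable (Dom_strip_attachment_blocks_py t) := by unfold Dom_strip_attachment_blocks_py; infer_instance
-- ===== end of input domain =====

-- B replaces the per-keyword find() passes + min() by a single left-to-right scan stopping at the
-- first position where any keyword starts (same cost; a different algorithm, proved equivalent).

-- the keyword list both Pythons carry literally
def pvKeywords : List (List Char) :=
  ["republic of south africa".toList,
   "department:".toList,
   "department of higher education".toList,
   "certificate of achievement".toList,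
   "statement of results".toList,
   "identity number".toList,
   "serial number".toList,
   "issued by authority".toList,
   "umalusi".toList,
   "this certificate is printed".toList,
   "please hold up to the light".toList]

-- ===== PORT A =====
-- the 'for kw in keywords: idx = lower.find(kw); if idx != -1: indices.append(idx)' loop
def pvIndices (lower : List Char) : List Int :=
  pvKeywords.foldl (fun acc kw =>
    let idx := PySem.Chars.find lower kw
    if idx ≠ -1 then acc ++ [idx] else acc) []

def strip_attachment_blocks_py (t : String) : String :=
  let lower := PySem.Chars.lower t.toList
  let indices := pvIndices lower
  match PySem.List.min? indices (fun x => x) with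
  | none => t
  | some cut =>
    if cut > 600 then String.ofList (PySem.Chars.strip (PySem.List.slice t.toList none (some cut)))
    else t

-- ===== PORT B =====
-- 'any(lower.startswith(kw, i) for kw in keywords)' at position i, i.e. on the suffix from i
def pvAnyHit (s : List Char) : Bool :=
  pvKeywords.any (fun kw => PySem.Chars.startswith s kw)

-- 'for i in range(len(lower)): if any(...): ...' as structural recursion on the suffix
def pvScan : List Char → Nat → Option Nat
  | [], _ => none
  | c :: rest, i => if pvAnyHit (c :: rest) then some i else pvScan rest (i + 1)

def strip_attachment_blocks_py_alt (t : String) : String :=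
  match pvScan (PySem.Chars.lower t.toList) 0 with
  | none => t
  | some i =>
    if i > 600 then String.ofList (PySem.Chars.strip (t.toList.take i))
    else t

-- ===== PRECONDITION & SPEC =====
def Spec_strip_attachment_blocks_py (t : String) (out : String) : Prop := out = strip_attachment_blocks_py_alt t
instance (t : String) (out : String) : Decidable (Spec_strip_attachment_blocks_py t out) := by unfold Spec_strip_attachment_blocks_py; infer_instance

-- ===== CLAIM (what is proved, stated in full; the proofs are below) =====
def Claim_equal_strip_attachment_blocks_py : Prop := ∀ (t : String), Dom_strip_attachment_blocks_py t → Spec_strip_attachment_blocks_py t (strip_attachment_blocks_py t)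

-- ===== LEMMAS AND PROOFS =====

lemma pvAnyHit_nil : pvAnyHit ([] : List Char) = false := by decide

lemma pvIndices_eq (L : List Char) :
    pvIndices L =
      (pvKeywords.filter (fun kw => PySem.Chars.find L kw ≠ -1)).map (PySem.Chars.find L) := by
  unfold pvIndices
  have h := PySem.List.foldl_append_if (fun kw => decide (PySem.Chars.find L kw ≠ -1))
    (PySem.Chars.find L) pvKeywords []
  simpa using h

lemma pvScan_eq_none (s : List Char) (i0 : Nat)
    (h : ∀ j, pvAnyHit (s.drop j) = false) : pvScan s i0 = none := by
  induction s generalizing i0 with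
  | nil => rfl
  | cons c rest ih =>
    have h0 := h 0
    simp only [List.drop_zero] at h0
    simp only [pvScan, h0, Bool.false_eq_true, if_false]
    exact ih _ (fun j => by simpa using h (j + 1))

lemma pvScan_eq_some (s : List Char) (i0 j : Nat)
    (hj : pvAnyHit (s.drop j) = true)
    (hmin : ∀ j' < j, pvAnyHit (s.drop j') = false) :
    pvScan s i0 = some (i0 + j) := by
  induction s generalizing i0 j with
  | nil =>
    exfalso
    rw [List.drop_nil, pvAnyHit_nil] at hj
    exact Bool.false_ne_true hj
  | cons c rest ih =>
    cases j with
    | zero =>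
      simp only [List.drop_zero] at hj
      simp [pvScan, hj]
    | succ j' =>
      have h0 := hmin 0 (Nat.succ_pos _)
      simp only [List.drop_zero] at h0
      have ihr := ih (i0 + 1) j' (by simpa using hj)
        (fun k hk => by simpa using hmin (k + 1) (by omega))
      simp only [pvScan, h0, Bool.false_eq_true, if_false, ihr]
      congr 1
      omega

-- a keyword prefixing a suffix of L is an infix of L
lemma pvHit_infix {L kw : List Char} {j : Nat} (h : kw <+: L.drop j) : kw <:+: L :=
  h.isInfix.trans (List.drop_suffix j L).isInfix

-- ===== VERDICT (by name: the statement is the Claim_ definition above) =====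
theorem strip_attachment_blocks_py_spec : Claim_equal_strip_attachment_blocks_py := by
  intro t _
  unfold Spec_strip_attachment_blocks_py strip_attachment_blocks_py strip_attachment_blocks_py_alt
  set L := PySem.Chars.lower t.toList with hL
  cases hmin : PySem.List.min? (pvIndices L) (fun x => x) with
  | none =>
    -- no keyword occurs: A returns t; the scan finds nothing either
    have hnil : pvIndices L = [] := (PySem.List.min?_eq_none_iff _ _).mp hmin
    rw [pvIndices_eq] at hnil
    have hfe : (pvKeywords.filter (fun kw => PySem.Chars.find L kw ≠ -1)) = [] :=
      List.map_eq_nil_iff.mp hnil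
    have hall : ∀ kw ∈ pvKeywords, PySem.Chars.find L kw = -1 := by
      intro kw hkw
      have := List.filter_eq_nil_iff.mp hfe kw hkw
      simpa using this
    have hscan : pvScan L 0 = none := by
      apply pvScan_eq_none
      intro j
      cases hcase : pvAnyHit (L.drop j) with
      | false => rfl
      | true =>
        exfalso
        have hb : (pvKeywords.any (fun kw => PySem.Chars.startswith (L.drop j) kw)) = true := hcase
        obtain ⟨kw, hkw, hsw⟩ := List.any_eq_true.mp hb
        have hpre : kw <+: L.drop j := (PySem.Chars.startswith_iff _ _).mp hsw
        exact ((PySem.Chars.find_eq_neg_one_iff L kw).mp (hall kw hkw)) (pvHit_infix hpre)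
    show (match PySem.List.min? (pvIndices L) (fun x => x) with
          | none => t
          | some cut =>
            if cut > 600 then String.ofList (PySem.Chars.strip (PySem.List.slice t.toList none (some cut))) else t)
        = (match pvScan L 0 with
          | none => t
          | some i => if i > 600 then String.ofList (PySem.Chars.strip (t.toList.take i)) else t)
    rw [hmin, hscan]
  | some m =>
    have hmem : m ∈ pvIndices L := PySem.List.min?_mem hmin
    have hle : ∀ y ∈ pvIndices L, m ≤ y := by
      have := PySem.List.min?_isMin hmin
      simpa using this
    rw [pvIndices_eq] at hmem hle
    obtain ⟨kw₀, hk₀, hkw₀⟩ := List.mem_map.mp hmem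
    obtain ⟨hkw₀mem1, hkw₀mem2⟩ := List.mem_filter.mp hk₀
    have hne₀ : PySem.Chars.find L kw₀ ≠ -1 := of_decide_eq_true hkw₀mem2
    have hpos : (0:Int) ≤ m := by
      rw [← hkw₀]
      rcases (PySem.Chars.neg_one_le_find L kw₀).lt_or_eq with h | h
      · omega
      · exact absurd h.symm hne₀
    set j := m.toNat with hj
    have hmj : m = (j : Int) := by omega
    -- the scan stops exactly at j, the minimum of the find indices
    have hhit : pvAnyHit (L.drop j) = true := by
      have hsp := PySem.Chars.find_spec (s := L) (sub := kw₀) (by omega)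
      have htn : (PySem.Chars.find L kw₀).toNat = j := by rw [hkw₀]
      rw [htn] at hsp
      exact List.any_eq_true.mpr ⟨kw₀, hkw₀mem1, (PySem.Chars.startswith_iff _ _).mpr hsp.1⟩
    have hminj : ∀ j' < j, pvAnyHit (L.drop j') = false := by
      intro j' hj'
      cases hcase : pvAnyHit (L.drop j') with
      | false => rfl
      | true =>
        exfalso
        have hb : (pvKeywords.any (fun kw => PySem.Chars.startswith (L.drop j') kw)) = true := hcase
        obtain ⟨kw, hkw, hsw⟩ := List.any_eq_true.mp hb
        have hpre : kw <+: L.drop j' := (PySem.Chars.startswith_iff _ _).mp hsw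
        have hnem : PySem.Chars.find L kw ≠ -1 := fun hcon =>
          ((PySem.Chars.find_eq_neg_one_iff L kw).mp hcon) (pvHit_infix hpre)
        have hfpos : (0:Int) ≤ PySem.Chars.find L kw := by
          rcases (PySem.Chars.neg_one_le_find L kw).lt_or_eq with h | h
          · omega
          · exact absurd h.symm hnem
        have hsp := PySem.Chars.find_spec (s := L) (sub := kw) hfpos
        have hfle : (PySem.Chars.find L kw).toNat ≤ j' := by
          by_contra hlt
          exact (hsp.2 j' (by omega)) hpre
        have hmlef : m ≤ PySem.Chars.find L kw :=
          hle _ (List.mem_map.mpr ⟨kw, List.mem_filter.mpr ⟨hkw, decide_eq_true hnem⟩, rfl⟩)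
        omega
    have hscan : pvScan L 0 = some j := by simpa using pvScan_eq_some L 0 j hhit hminj
    show (match PySem.List.min? (pvIndices L) (fun x => x) with
          | none => t
          | some cut =>
            if cut > 600 then String.ofList (PySem.Chars.strip (PySem.List.slice t.toList none (some cut))) else t)
        = (match pvScan L 0 with
          | none => t
          | some i => if i > 600 then String.ofList (PySem.Chars.strip (t.toList.take i)) else t)
    rw [hmin, hscan, hmj]
    show (if ((j : Int) > 600) then
            String.ofList (PySem.Chars.strip (PySem.List.slice t.toList none (some ((j : Int))))) else t)
       = (if (j > 600) then String.ofList (PySem.Chars.strip (t.toList.take j)) else t)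
    by_cases h600 : (600 : Int) < (j : Int)
    · rw [if_pos h600, if_pos (by exact_mod_cast h600), PySem.List.slice_to_natCast]
    · rw [if_neg h600, if_neg (by omega)]
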